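-- pv_equiv track=rewrite | github.com/lumafepe/CPar | compare.py | at_most_equal
-- ===== SOURCE A (Python) =====
-- def at_most_equal(a: str, b: str, level: int = 10) -> bool:
--
--     at: int = 0
--
--     if len(a) != len(b):
--         return False, 0
--
--     for char_idx in range(len(a)):
--
--         if a[char_idx].isnumeric() and b[char_idx].isnumeric():
--
--             if a[char_idx] != b[char_idx] and at <= level:
--                 return False, at + 1
--
--             at += 1
--
--     return True, 0
-- ===== SOURCE B (Python) =====
-- def at_most_equal(a: str, b: str, level: int = 10) -> bool:
--     if len(a) != len(b):
--         return False, 0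
--     # Stage 1: the two digit subsequences at positions comparable in both strings.
--     pairs = [(x, y) for x, y in zip(a, b) if x.isnumeric() and y.isnumeric()]
--     da = ''.join(x for x, y in pairs)
--     db = ''.join(y for x, y in pairs)
--     # Stage 2: equal subsequences -> equal; otherwise decide by the common-prefix
--     # length k (the index of the first differing comparable pair), closed form.
--     if da == db:
--         return True, 0
--     k = next(i for i in range(len(da)) if da[i] != db[i])
--     return (False, k + 1) if k <= level else (True, 0)
-- ===== Notes on version B (the rewrite author's own statement) =====
-- stated objective: alternative
-- what changed: B replaces A's single counter loop with its threshold test inside by staged passes: it extracts the two comparable digit subsequences, fast-paths their equality, computes the common-prefix length k of the two subsequences, and decides the result from k by a closed-form comparison with level instead of an in-loop counter check.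
import Mathlib
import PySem

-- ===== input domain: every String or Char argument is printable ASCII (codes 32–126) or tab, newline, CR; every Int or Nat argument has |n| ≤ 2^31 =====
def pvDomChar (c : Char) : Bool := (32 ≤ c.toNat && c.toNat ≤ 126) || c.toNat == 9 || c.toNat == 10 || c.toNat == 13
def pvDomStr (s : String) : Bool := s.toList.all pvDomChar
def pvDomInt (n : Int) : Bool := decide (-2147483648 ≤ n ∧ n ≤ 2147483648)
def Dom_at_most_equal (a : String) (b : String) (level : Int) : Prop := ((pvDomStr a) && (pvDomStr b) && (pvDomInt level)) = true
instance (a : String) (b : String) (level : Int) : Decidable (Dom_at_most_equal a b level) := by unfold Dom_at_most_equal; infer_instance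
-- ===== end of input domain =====

-- B replaces A's counter loop with threshold test inside by staged passes: extract the two
-- comparable digit subsequences, fast-path their equality, and decide by the common-prefix
-- length in closed form (alternative; same asymptotic cost).

-- ===== PORT A =====
-- on the printable-ASCII domain, str.isnumeric() for a single char holds exactly for '0'..'9', i.e. PySem.Chars.isdigit
def pvLoopA (level : Int) : List Char → List Char → Int → Bool × Int
  | [], _, _ => (true, 0)
  | _ :: _, [], _ => (true, 0)  -- unreachable: lengths equal when called
  | x :: xs, y :: ys, at_ =>
    if PySem.Chars.isdigit x && PySem.Chars.isdigit y then
      if x ≠ y ∧ at_ ≤ level then (false, at_ + 1)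
      else pvLoopA level xs ys (at_ + 1)
    else pvLoopA level xs ys at_

def at_most_equal (a : String) (b : String) (level : Int) : Bool × Int :=
  if a.toList.length ≠ b.toList.length then (false, 0)
  else pvLoopA level a.toList b.toList 0

-- ===== PORT B =====
-- positions comparable in both strings (Python: the filtered zip list)
def pvPairsB (a b : List Char) : List (Char × Char) :=
  (a.zip b).filter (fun p => PySem.Chars.isdigit p.1 && PySem.Chars.isdigit p.2)

-- Python: next(i for i in range(len(da)) if da[i] != db[i]); only evaluated when da ≠ db
def pvFirstDiff : List Char → List Char → Int
  | x :: xs, y :: ys => if x ≠ y then 0 else pvFirstDiff xs ys + 1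
  | _, _ => 0  -- unreachable under the guard da ≠ db (equal lengths)

def at_most_equal_alt (a : String) (b : String) (level : Int) : Bool × Int :=
  if a.toList.length ≠ b.toList.length then (false, 0)
  else
    let pairs := pvPairsB a.toList b.toList
    let da := pairs.map Prod.fst
    let db := pairs.map Prod.snd
    if da = db then (true, 0)
    else
      let k := pvFirstDiff da db
      if k ≤ level then (false, k + 1) else (true, 0)

-- ===== PRECONDITION & SPEC =====
def Spec_at_most_equal (a : String) (b : String) (level : Int) (out : Bool × Int) : Prop := out = at_most_equal_alt a b level
instance (a : String) (b : String) (level : Int) (out : Bool × Int) : Decidable (Spec_at_most_equal a b level out) := by unfold Spec_at_most_equal; infer_instance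

-- ===== CLAIM (what is proved, stated in full; the proofs are below) =====
def Claim_equal_at_most_equal : Prop := ∀ (a : String) (b : String) (level : Int), Dom_at_most_equal a b level → Spec_at_most_equal a b level (at_most_equal a b level)

-- ===== LEMMAS AND PROOFS =====
-- proof-only helper: A's loop restricted to the comparable pairs list
def pvPairScan (level : Int) : List (Char × Char) → Int → Bool × Int
  | [], _ => (true, 0)
  | (x, y) :: ps, at_ =>
    if x ≠ y ∧ at_ ≤ level then (false, at_ + 1) else pvPairScan level ps (at_ + 1)

theorem loopA_eq_pairScan (level : Int) (xs ys : List Char) (at_ : Int) :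
    pvLoopA level xs ys at_ = pvPairScan level (pvPairsB xs ys) at_ := by
  induction xs generalizing ys at_ with
  | nil => simp [pvLoopA, pvPairsB, pvPairScan]
  | cons x xs ih =>
    cases ys with
    | nil => simp [pvLoopA, pvPairsB, pvPairScan]
    | cons y ys =>
      simp only [pvLoopA, pvPairsB, List.zip_cons_cons, List.filter_cons]
      by_cases h : (PySem.Chars.isdigit x && PySem.Chars.isdigit y) = true
      · simp only [h, if_true]
        by_cases h2 : x ≠ y ∧ at_ ≤ level
        · simp [pvPairScan, h2]
        · simp only [if_neg h2, pvPairScan]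
          simpa [pvPairsB] using ih ys (at_ + 1)
      · simp only [h, if_false, Bool.false_eq_true]
        simpa [pvPairsB] using ih ys at_

-- once the counter exceeds level, the scan can never return false
theorem pairScan_high (level : Int) (ps : List (Char × Char)) (at_ : Int) (h : level < at_) :
    pvPairScan level ps at_ = (true, 0) := by
  induction ps generalizing at_ with
  | nil => rfl
  | cons p ps ih =>
    rcases p with ⟨x, y⟩
    simp only [pvPairScan]
    rw [if_neg (by rintro ⟨_, hle⟩; omega)]
    exact ih (at_ + 1) (by omega)

-- the scan, characterised by the projections and their first difference
theorem pairScan_char (level : Int) (ps : List (Char × Char)) (at_ : Int) :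
    pvPairScan level ps at_ =
      (if ps.map Prod.fst = ps.map Prod.snd then (true, 0)
       else if at_ + pvFirstDiff (ps.map Prod.fst) (ps.map Prod.snd) ≤ level then
         (false, at_ + pvFirstDiff (ps.map Prod.fst) (ps.map Prod.snd) + 1)
       else (true, 0)) := by
  induction ps generalizing at_ with
  | nil => rfl
  | cons p ps ih =>
    rcases p with ⟨x, y⟩
    simp only [pvPairScan, List.map_cons]
    by_cases hxy : x = y
    · subst hxy
      rw [if_neg (by simp)]
      rw [ih (at_ + 1)]
      by_cases he : ps.map Prod.fst = ps.map Prod.snd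
      · simp [he]
      · have hne : ¬ (x :: ps.map Prod.fst = x :: ps.map Prod.snd) := by simp [he]
        rw [if_neg he, if_neg hne]
        simp only [pvFirstDiff, if_neg (by simp : ¬ x ≠ x)]
        split_ifs with h1 h2 h3
        · simp only [Prod.mk.injEq, true_and]
          omega
        · exfalso; omega
        · exfalso; omega
        · rfl
    · have hne : ¬ (x :: ps.map Prod.fst = y :: ps.map Prod.snd) := by simp [hxy]
      rw [if_neg hne]
      simp only [pvFirstDiff, if_pos hxy]
      by_cases hle : at_ ≤ level
      · rw [if_pos ⟨hxy, hle⟩, if_pos (by omega : at_ + 0 ≤ level)]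
        norm_num
      · rw [if_neg (by rintro ⟨_, h⟩; exact hle h)]
        rw [pairScan_high level ps (at_ + 1) (by omega)]
        rw [if_neg (by omega : ¬ at_ + 0 ≤ level)]

theorem at_most_equal_spec : Claim_equal_at_most_equal := by
  intro a b level _
  unfold Spec_at_most_equal at_most_equal at_most_equal_alt
  split_ifs with h
  · rfl
  · rw [loopA_eq_pairScan, pairScan_char]
    by_cases he : ((pvPairsB a.toList b.toList).map Prod.fst) = ((pvPairsB a.toList b.toList).map Prod.snd)
    · simp [he]
    · simp only [he, if_false]
      rw [(by omega : (0:Int) + pvFirstDiff ((pvPairsB a.toList b.toList).map Prod.fst) ((pvPairsB a.toList b.toList).map Prod.snd) = pvFirstDiff ((pvPairsB a.toList b.toList).map Prod.fst) ((pvPairsB a.toList b.toList).map Prod.snd))]
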